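-- pv_equiv track=rewrite | github.com/lfy79001/TableQAKit | TableQAKit/numerical/MRC/tag_op/tagop/modeling_tagop.py | get_span_tokens_from_paragraph
-- ===== SOURCE A (Python) =====
-- from typing import Dict, List, Tuple
--
-- def get_span_tokens_from_paragraph(paragraph_token_tag_prediction, paragraph_tokens) -> List[str]:
--     span_tokens = []
--     span_start = False
--     for i in range(1, min(len(paragraph_tokens) + 1, len(paragraph_token_tag_prediction))):
--         if paragraph_token_tag_prediction[i] == 0:
--             span_start = False
--         if paragraph_token_tag_prediction[i] != 0:
--             if not span_start:
--                 span_tokens.append([paragraph_tokens[i - 1]])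
--                 span_start = True
--             else:
--                 span_tokens[-1] += [paragraph_tokens[i - 1]]
--     span_tokens = [" ".join(tokens) for tokens in span_tokens]
--     return span_tokens
-- ===== SOURCE B (Python) =====
-- def get_span_tokens_from_paragraph(paragraph_token_tag_prediction, paragraph_tokens):
--     pred = paragraph_token_tag_prediction
--     toks = paragraph_tokens
--     n = min(len(toks) + 1, len(pred))
--     starts = [i for i in range(1, n) if pred[i] != 0 and (i == 1 or pred[i - 1] == 0)]
--     ends = [i for i in range(1, n) if pred[i] != 0 and (i == n - 1 or pred[i + 1] == 0)]
--     return [" ".join(toks[s - 1:e]) for s, e in zip(starts, ends)]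
-- ===== Notes on version B (the rewrite author's own statement) =====
-- stated objective: alternative
-- what changed: Replaced the stateful span_start loop (append-new vs extend-last on a mutable last group) with a stateless boundary-detection formulation: filter the index range for span starts (tag nonzero, predecessor zero or first) and span ends (tag nonzero, successor zero or last), zip them, and join a list slice per (start, end) pair.
import Mathlib
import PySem

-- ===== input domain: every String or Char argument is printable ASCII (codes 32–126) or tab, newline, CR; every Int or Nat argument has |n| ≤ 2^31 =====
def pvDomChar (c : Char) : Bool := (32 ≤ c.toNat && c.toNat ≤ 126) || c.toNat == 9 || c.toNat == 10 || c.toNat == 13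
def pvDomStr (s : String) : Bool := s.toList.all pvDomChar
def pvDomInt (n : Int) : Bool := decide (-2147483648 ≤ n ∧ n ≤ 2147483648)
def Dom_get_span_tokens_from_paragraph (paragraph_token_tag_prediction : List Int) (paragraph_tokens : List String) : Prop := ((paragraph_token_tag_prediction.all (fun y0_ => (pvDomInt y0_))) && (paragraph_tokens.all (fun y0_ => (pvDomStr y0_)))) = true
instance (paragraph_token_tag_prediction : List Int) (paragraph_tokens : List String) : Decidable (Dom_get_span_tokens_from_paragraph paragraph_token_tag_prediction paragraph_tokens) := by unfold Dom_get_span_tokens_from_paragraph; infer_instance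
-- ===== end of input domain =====

-- B replaces A's span_start state machine by a stateless boundary detection: filter the
-- index range for span starts and span ends, zip them, join a slice per pair; same cost,
-- an alternative decomposition.

-- ===== PORT A =====
-- span_tokens[-1] += [x] on a (known nonempty) list of lists
def pvAppendLast (spans : List (List String)) (s : String) : List (List String) :=
  match spans with
  | [] => []
  | g :: gs => if gs.isEmpty then [g ++ [s]] else g :: pvAppendLast gs s

-- the loop body of A: tag i = paragraph_token_tag_prediction[i], tok i = paragraph_tokens[i-1]
def pvStepA (tag : Int → Int) (tok : Int → String) (st : List (List String) × Bool) (i : Int) : List (List String) × Bool :=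
  let span_start := if tag i == 0 then false else st.2
  if tag i != 0 then
    if span_start = false then (st.1 ++ [[tok i]], true)
    else (pvAppendLast st.1 (tok i), span_start)
  else (st.1, span_start)

def get_span_tokens_from_paragraph (paragraph_token_tag_prediction : List Int) (paragraph_tokens : List String) : List String :=
  let n := min ((paragraph_tokens.length : Int) + 1) (paragraph_token_tag_prediction.length : Int)
  let st := (PySem.List.pyRange 1 n 1).foldl
      (pvStepA (fun i => PySem.List.pyGetD paragraph_token_tag_prediction i 0)
               (fun i => PySem.List.pyGetD paragraph_tokens (i - 1) "")) ([], false)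
  st.1.map (fun tokens => PySem.Str.join " " tokens)

-- ===== PORT B =====
def get_span_tokens_from_paragraph_alt (paragraph_token_tag_prediction : List Int) (paragraph_tokens : List String) : List String :=
  let pred := paragraph_token_tag_prediction
  let toks := paragraph_tokens
  let n := min ((toks.length : Int) + 1) (pred.length : Int)
  let starts := (PySem.List.pyRange 1 n 1).filter
      (fun i => PySem.List.pyGetD pred i 0 != 0 && (i == 1 || PySem.List.pyGetD pred (i - 1) 0 == 0))
  let ends := (PySem.List.pyRange 1 n 1).filter
      (fun i => PySem.List.pyGetD pred i 0 != 0 && (i == n - 1 || PySem.List.pyGetD pred (i + 1) 0 == 0))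
  (starts.zip ends).map
    (fun p => PySem.Str.join " " (PySem.List.slice toks (some (p.1 - 1)) (some p.2)))

-- ===== PRECONDITION & SPEC =====
def Spec_get_span_tokens_from_paragraph (paragraph_token_tag_prediction : List Int) (paragraph_tokens : List String) (out : List String) : Prop := out = get_span_tokens_from_paragraph_alt paragraph_token_tag_prediction paragraph_tokens
instance (paragraph_token_tag_prediction : List Int) (paragraph_tokens : List String) (out : List String) : Decidable (Spec_get_span_tokens_from_paragraph paragraph_token_tag_prediction paragraph_tokens out) := by unfold Spec_get_span_tokens_from_paragraph; infer_instance

-- ===== CLAIM (what is proved, stated in full; the proofs are below) =====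
def Claim_equal_get_span_tokens_from_paragraph : Prop := ∀ (paragraph_token_tag_prediction : List Int) (paragraph_tokens : List String), Dom_get_span_tokens_from_paragraph paragraph_token_tag_prediction paragraph_tokens → Spec_get_span_tokens_from_paragraph paragraph_token_tag_prediction paragraph_tokens (get_span_tokens_from_paragraph paragraph_token_tag_prediction paragraph_tokens)

-- ===== LEMMAS AND PROOFS =====

-- the common specification both ports are reduced to: the spans of consecutive true-key indices
def pvSpans (key : Int → Bool) (tok : Int → String) : List Int → List (List String)
  | [] => []
  | i :: t =>
    if key i then (tok i :: (t.takeWhile key).map tok) :: pvSpans key tok (t.dropWhile key)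
    else pvSpans key tok t
termination_by l => l.length
decreasing_by
  · simp only [List.length_cons]
    exact Nat.lt_succ_of_le (List.length_dropWhile_le _ _)
  · simp

-- [a, a+1, ..., a+m-1]
def pvConsec (a : Int) : Nat → List Int
  | 0 => []
  | m+1 => a :: pvConsec (a+1) m

theorem pvConsec_length (m : Nat) : ∀ a : Int, (pvConsec a m).length = m := by
  induction m with
  | zero => intro a; rfl
  | succ m ih => intro a; simp [pvConsec, ih]

theorem pvConsec_getElem (m : Nat) : ∀ (a : Int) (k : Nat) (hk : k < (pvConsec a m).length),
    (pvConsec a m)[k] = a + k := by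
  induction m with
  | zero => intro a k hk; simp [pvConsec_length] at hk
  | succ m ih =>
    intro a k hk
    cases k with
    | zero => simp [pvConsec]
    | succ k =>
      have hk' : k < (pvConsec (a+1) m).length := by
        simp [pvConsec_length] at hk ⊢; omega
      simp only [pvConsec, List.getElem_cons_succ]
      rw [ih (a+1) k hk']
      omega

theorem pvMem_consec (m : Nat) : ∀ (a i : Int), i ∈ pvConsec a m ↔ a ≤ i ∧ i < a + m := by
  induction m with
  | zero => intro a i; simp [pvConsec]
  | succ m ih =>
    intro a i
    simp only [pvConsec, List.mem_cons, ih (a+1) i]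
    push_cast
    omega

theorem pvConsec_append (r s : Nat) : ∀ a : Int, pvConsec a (r + s) = pvConsec a r ++ pvConsec (a + r) s := by
  induction r with
  | zero => intro a; simp [pvConsec]
  | succ r ih =>
    intro a
    have h1 : r + 1 + s = (r + s) + 1 := by omega
    have h2 : a + 1 + (r : Int) = a + ((r + 1 : Nat) : Int) := by omega
    rw [h1, show pvConsec a ((r + s) + 1) = a :: pvConsec (a+1) (r + s) from rfl,
        ih (a+1), show pvConsec a (r+1) = a :: pvConsec (a+1) r from rfl,
        List.cons_append, h2]

theorem pvRange_eq_consec : ∀ (m : Nat) (a b : Int), (b - a).toNat = m →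
    PySem.List.pyRange a b 1 = pvConsec a m := by
  intro m
  induction m with
  | zero =>
    intro a b h
    have : b ≤ a := by omega
    rw [PySem.List.pyRange_one_eq_nil this]; rfl
  | succ m ih =>
    intro a b h
    have hab : a < b := by omega
    rw [PySem.List.pyRange_one_cons hab]
    simp only [pvConsec]
    congr 1
    exact ih (a+1) b (by omega)

-- takeWhile/dropWhile on a consecutive block is again a consecutive block
theorem pvConsec_split (K : Int → Bool) (m : Nat) : ∀ a : Int,
    ∃ r : Nat, r ≤ m ∧ (pvConsec a m).takeWhile K = pvConsec a r ∧
      (pvConsec a m).dropWhile K = pvConsec (a + r) (m - r) ∧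
      (∀ k : Nat, k < r → K (a + k) = true) ∧ (r < m → K (a + r) = false) := by
  induction m with
  | zero =>
    intro a
    exact ⟨0, le_refl _, rfl, by simp [pvConsec], by intro k hk; omega, by intro h; omega⟩
  | succ m ih =>
    intro a
    by_cases hKa : K a = true
    · obtain ⟨r, hr, ht, hd, hall, hstop⟩ := ih (a+1)
      refine ⟨r + 1, by omega, ?_, ?_, ?_, ?_⟩
      · simp [pvConsec, hKa, ht]
      · simp only [pvConsec, List.dropWhile_cons, hKa, hd]
        have h2 : a + 1 + (r : Int) = a + ((r + 1 : Nat) : Int) := by omega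
        have h3 : m - r = m + 1 - (r + 1) := by omega
        rw [h2, h3]
        simp
      · intro k hk
        cases k with
        | zero => simpa using hKa
        | succ k =>
          have := hall k (by omega)
          convert this using 2
          push_cast; ring
      · intro h
        have := hstop (by omega)
        convert this using 2
        push_cast; ring
    · refine ⟨0, by omega, ?_, ?_, by intro k hk; omega, ?_⟩
      · simp only [pvConsec, List.takeWhile_cons]
        simp [hKa]
      · simp only [pvConsec, List.dropWhile_cons]
        simp [hKa]
      · intro _; simpa using hKa

theorem pvTakeWhile_congr {α : Type} (p q : α → Bool) : ∀ (l : List α), (∀ x ∈ l, p x = q x) →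
    l.takeWhile p = l.takeWhile q := by
  intro l
  induction l with
  | nil => intro _; rfl
  | cons x t ih =>
    intro h
    simp only [List.takeWhile_cons, h x (by simp)]
    cases q x
    · rfl
    · simp [ih (fun y hy => h y (by simp [hy]))]

theorem pvDropWhile_congr {α : Type} (p q : α → Bool) : ∀ (l : List α), (∀ x ∈ l, p x = q x) →
    l.dropWhile p = l.dropWhile q := by
  intro l
  induction l with
  | nil => intro _; rfl
  | cons x t ih =>
    intro h
    simp only [List.dropWhile_cons, h x (by simp)]
    cases q x
    · rfl
    · simp [ih (fun y hy => h y (by simp [hy]))]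

theorem pvSpans_congr_aux (k1 k2 : Int → Bool) (tok : Int → String) : ∀ (N : Nat) (l : List Int),
    l.length ≤ N → (∀ i ∈ l, k1 i = k2 i) → pvSpans k1 tok l = pvSpans k2 tok l := by
  intro N
  induction N with
  | zero =>
    intro l hl _
    have : l = [] := by cases l <;> simp_all
    rw [this, pvSpans, pvSpans]
  | succ N ih =>
    intro l hl h
    cases l with
    | nil => rw [pvSpans, pvSpans]
    | cons i t =>
      rw [pvSpans, pvSpans]
      have ht : ∀ x ∈ t, k1 x = k2 x := fun x hx => h x (by simp [hx])
      by_cases hKi : k1 i = true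
      · have h2 : k2 i = true := (h i (by simp)) ▸ hKi
        rw [if_pos hKi, if_pos h2, pvTakeWhile_congr k1 k2 t ht, pvDropWhile_congr k1 k2 t ht]
        congr 1
        exact ih (t.dropWhile k2)
          (le_trans (List.length_dropWhile_le _ _) (by simp at hl; omega))
          (fun x hx => ht x ((List.dropWhile_sublist _).subset hx))
      · have h2 : ¬ (k2 i = true) := by rw [← h i (by simp)]; exact hKi
        rw [if_neg hKi, if_neg h2]
        exact ih t (by simp at hl; omega) ht

theorem pvSpans_congr (k1 k2 : Int → Bool) (tok : Int → String) (l : List Int)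
    (h : ∀ i ∈ l, k1 i = k2 i) : pvSpans k1 tok l = pvSpans k2 tok l :=
  pvSpans_congr_aux k1 k2 tok l.length l (le_refl _) h

theorem pvAppendLast_append (acc : List (List String)) (g : List String) (s : String) :
    pvAppendLast (acc ++ [g]) s = acc ++ [g ++ [s]] := by
  induction acc with
  | nil => simp [pvAppendLast]
  | cons a as ih => simp [pvAppendLast, ih]

-- A's fold equals pvSpans (joint statement for the two values of span_start)
theorem foldA_spec (tag : Int → Int) (tok : Int → String) (ℓ : List Int) :
    (∀ acc : List (List String),
        ((ℓ.foldl (pvStepA tag tok) (acc, false)).1 = acc ++ pvSpans (fun i => tag i != 0) tok ℓ))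
    ∧ (∀ (acc : List (List String)) (g : List String),
        ((ℓ.foldl (pvStepA tag tok) (acc ++ [g], true)).1 =
          acc ++ [g ++ (ℓ.takeWhile (fun i => tag i != 0)).map tok]
              ++ pvSpans (fun i => tag i != 0) tok (ℓ.dropWhile (fun i => tag i != 0)))) := by
  induction ℓ with
  | nil => simp [pvSpans]
  | cons i t ih =>
    constructor
    · intro acc
      by_cases h : tag i = 0
      · have hstep : pvStepA tag tok (acc, false) i = (acc, false) := by
          simp [pvStepA, h]
        rw [List.foldl_cons, hstep, ih.1, pvSpans]
        simp [h]
      · have hstep : pvStepA tag tok (acc, false) i = (acc ++ [[tok i]], true) := by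
          simp [pvStepA, h]
        rw [List.foldl_cons, hstep, ih.2, pvSpans]
        simp [h]
    · intro acc g
      by_cases h : tag i = 0
      · have hstep : pvStepA tag tok (acc ++ [g], true) i = (acc ++ [g], false) := by
          simp [pvStepA, h]
        rw [List.foldl_cons, hstep, ih.1]
        have h1 : ((i :: t).takeWhile (fun i => tag i != 0)) = [] := by
          simp [List.takeWhile, h]
        have h2 : ((i :: t).dropWhile (fun i => tag i != 0)) = i :: t := by
          simp [List.dropWhile, h]
        rw [h1, h2, pvSpans]
        simp [h]
      · have hstep : pvStepA tag tok (acc ++ [g], true) i = (acc ++ [g ++ [tok i]], true) := by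
          simp [pvStepA, h, pvAppendLast_append]
        rw [List.foldl_cons, hstep, ih.2]
        have h1 : ((i :: t).takeWhile (fun i => tag i != 0)) =
            i :: t.takeWhile (fun i => tag i != 0) := by
          simp [h]
        have h2 : ((i :: t).dropWhile (fun i => tag i != 0)) =
            t.dropWhile (fun i => tag i != 0) := by
          simp [h]
        rw [h1, h2]
        simp

-- inside a run everything is keyed true, so only the head passes the start filter
theorem pvStarts_run (K : Int → Bool) (r : Nat) (a : Int) (hr : 0 < r)
    (hall : ∀ k : Nat, k < r → K (a + k) = true) (hprev : K (a - 1) = false) :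
    (pvConsec a r).filter (fun i => K i && !K (i - 1)) = [a] := by
  obtain ⟨r', rfl⟩ : ∃ r', r = r' + 1 := ⟨r - 1, by omega⟩
  rw [show pvConsec a (r' + 1) = a :: pvConsec (a + 1) r' from rfl, List.filter_cons]
  have hKa : K a = true := by simpa using hall 0 (by omega)
  rw [if_pos (by simp [hKa, hprev])]
  congr 1
  rw [List.filter_eq_nil_iff]
  intro i hi
  rw [pvMem_consec] at hi
  have hKi1 : K (i - 1) = true := by
    have := hall (i - 1 - a).toNat (by omega)
    rwa [show a + ((i - 1 - a).toNat : Int) = i - 1 by omega] at this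
  simp [hKi1]

-- only the last element of a run passes the end filter
theorem pvEnds_run (K : Int → Bool) (r : Nat) : ∀ a : Int, 0 < r →
    (∀ k : Nat, k < r → K (a + k) = true) → K (a + r) = false →
    (pvConsec a r).filter (fun i => K i && !K (i + 1)) = [a + r - 1] := by
  induction r with
  | zero => intro a h; omega
  | succ r ih =>
    intro a _ hall hstop
    cases r with
    | zero =>
      have hKa : K a = true := by simpa using hall 0 (by omega)
      have h1 : K (a + 1) = false := by simpa using hstop
      rw [show pvConsec a 1 = [a] from rfl, List.filter_cons, List.filter_nil]
      rw [if_pos (by simp [hKa, h1])]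
      norm_num
    | succ r =>
      have hKa1 : K (a + 1) = true := by simpa using hall 1 (by omega)
      rw [show pvConsec a (r + 1 + 1) = a :: pvConsec (a + 1) (r + 1) from rfl, List.filter_cons]
      rw [if_neg (by simp [hKa1])]
      have := ih (a + 1) (by omega)
        (fun k hk => by
          have := hall (k + 1) (by omega)
          rwa [show a + ((k + 1 : Nat) : Int) = a + 1 + k by push_cast; ring] at this)
        (by rwa [show a + 1 + ((r + 1 : Nat) : Int) = a + ((r + 2 : Nat) : Int) by push_cast; ring])
      rw [this]
      congr 1
      push_cast; ring

-- the boundary-detection zip over a consecutive block equals the run spec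
theorem pvRuns (K : Int → Bool) (tok : Int → String) (F : Int → Int → String) (lo hi : Int)
    (hF : ∀ (s : Int) (r : Nat), lo ≤ s → s + r < hi →
        F s (s + r) = PySem.Str.join " " ((pvConsec s (r + 1)).map tok)) :
    ∀ (m : Nat) (a : Int), (K a = true → K (a - 1) = false) → K (a + m) = false →
      lo ≤ a → a + m ≤ hi →
      (((pvConsec a m).filter (fun i => K i && !K (i - 1))).zip
        ((pvConsec a m).filter (fun i => K i && !K (i + 1)))).map (fun p => F p.1 p.2)
      = (pvSpans K tok (pvConsec a m)).map (fun g => PySem.Str.join " " g) := by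
  intro m
  induction m using Nat.strong_induction_on with
  | _ m ihm =>
    intro a hinv hend hlo hhi
    cases m with
    | zero => simp [pvConsec, pvSpans]
    | succ m =>
      by_cases hKa : K a = true
      · -- a run starts at a; split the block at the end of the run
        obtain ⟨r, hr, ht, hd, hall, hstop⟩ := pvConsec_split K (m + 1) a
        have hrpos : 0 < r := by
          by_contra h
          have hr0 : r = 0 := by omega
          have := hstop (by omega)
          rw [hr0] at this
          simp at this
          rw [this] at hKa; simp at hKa
        have hKstop : K (a + r) = false := by
          by_cases h : r < m + 1
          · exact hstop h
          · have : r = m + 1 := by omega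
            rw [this]; exact_mod_cast hend
        -- decompose the block as run ++ rest
        have hsplit : pvConsec a (m + 1) = pvConsec a r ++ pvConsec (a + r) (m + 1 - r) := by
          rw [← pvConsec_append]
          congr 1; omega
        -- pvSpans on the original block
        have hspans : pvSpans K tok (pvConsec a (m + 1)) =
            ((pvConsec a r).map tok) :: pvSpans K tok (pvConsec (a + r) (m + 1 - r)) := by
          rw [show pvConsec a (m + 1) = a :: pvConsec (a + 1) m from rfl, pvSpans, if_pos hKa]
          have htw : (pvConsec (a + 1) m).takeWhile K = pvConsec (a + 1) (r - 1) := by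
            have : (pvConsec a (m + 1)).takeWhile K = pvConsec a r := ht
            rw [show pvConsec a (m + 1) = a :: pvConsec (a + 1) m from rfl,
                List.takeWhile_cons, hKa] at this
            simp only at this
            obtain ⟨r', rfl⟩ : ∃ r', r = r' + 1 := ⟨r - 1, by omega⟩
            rw [show pvConsec a (r' + 1) = a :: pvConsec (a + 1) r' from rfl] at this
            simpa using List.cons.inj this |>.2
          have hdw : (pvConsec (a + 1) m).dropWhile K = pvConsec (a + r) (m + 1 - r) := by
            have : (pvConsec a (m + 1)).dropWhile K = pvConsec (a + r) (m + 1 - r) := hd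
            rwa [show pvConsec a (m + 1) = a :: pvConsec (a + 1) m from rfl,
                List.dropWhile_cons, hKa] at this
          rw [htw, hdw]
          congr 2
          obtain ⟨r', rfl⟩ : ∃ r', r = r' + 1 := ⟨r - 1, by omega⟩
          simp [pvConsec]
        rw [hspans, hsplit, List.filter_append, List.filter_append,
            pvStarts_run K r a hrpos hall (hinv hKa),
            pvEnds_run K r a hrpos hall hKstop]
        -- zip, heads pair up
        simp only [List.singleton_append, List.zip_cons_cons, List.map_cons]
        congr 1
        · -- F a (a + r - 1) = join (run.map tok)
          obtain ⟨r', rfl⟩ : ∃ r', r = r' + 1 := ⟨r - 1, by omega⟩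
          have := hF a r' hlo (by push_cast at hhi ⊢; omega)
          rw [show a + ((r' + 1 : Nat) : Int) - 1 = a + (r' : Int) by push_cast; ring]
          exact this
        · -- the rest, by strong induction
          exact ihm (m + 1 - r) (by omega) (a + r)
            (by intro h; rw [hKstop] at h; simp at h)
            (by rw [show a + (r : Int) + ((m + 1 - r : Nat) : Int) = a + ((m + 1 : Nat) : Int) by push_cast; omega]; exact hend)
            (by omega)
            (by push_cast at hhi ⊢; omega)
      · -- K a false: a contributes to nothing
        have hKa' : K a = false := by simpa using hKa
        rw [show pvConsec a (m + 1) = a :: pvConsec (a + 1) m from rfl]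
        simp only [List.filter_cons]
        rw [if_neg (by simp [hKa']), if_neg (by simp [hKa']), pvSpans, if_neg (by simp [hKa'])]
        exact ihm m (by omega) (a + 1) (fun _ => by simpa using hKa')
          (by rw [show a + 1 + (m : Int) = a + ((m + 1 : Nat) : Int) by push_cast; ring]; exact hend)
          (by omega) (by push_cast at hhi ⊢; omega)

-- a slice of the token list is the map of tok over the corresponding consecutive indices
theorem pvSlice_eq_map_tok (toks : List String) (r : Nat) (s : Int) (hs : 1 ≤ s)
    (hb : s + r ≤ toks.length) :
    PySem.List.slice toks (some (s - 1)) (some (s + r)) =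
      (pvConsec s (r + 1)).map (fun i => PySem.List.pyGetD toks (i - 1) "") := by
  rw [PySem.List.slice_toNat toks (a := s - 1) (b := s + (r : Int)) (by omega) (by omega)]
  have hlen1 : ((toks.drop (s - 1).toNat).take ((s + r).toNat - (s - 1).toNat)).length = r + 1 := by
    simp [List.length_take, List.length_drop]
    omega
  apply List.ext_getElem
  · rw [hlen1]; simp [pvConsec_length]
  · intro k hk1 hk2
    rw [hlen1] at hk1
    have hmem : k < (pvConsec s (r + 1)).length := by simp [pvConsec_length]; omega
    rw [List.getElem_map, pvConsec_getElem (r + 1) s k hmem]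
    rw [List.getElem_take, List.getElem_drop]
    rw [PySem.List.pyGetD_eq_getElem toks "" (by omega) (by omega)]
    congr 1
    omega

-- the uniform key used by both reductions: tag nonzero AND index in the loop range
def pvK (pred : List Int) (n i : Int) : Bool :=
  decide (1 ≤ i ∧ i < n) && (PySem.List.pyGetD pred i 0 != 0)

theorem pvK_out_eq_false (pred : List Int) (n i : Int) (h : ¬ (1 ≤ i ∧ i < n)) :
    pvK pred n i = false := by
  unfold pvK
  rw [decide_eq_false h]
  simp

theorem pvKey_eq_pvK (pred : List Int) (n i : Int) (h : 1 ≤ i ∧ i < n) :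
    (PySem.List.pyGetD pred i 0 != 0) = pvK pred n i := by
  unfold pvK
  rw [decide_eq_true h]
  simp

theorem pvBeq_zero_eq_not_bne (y : Int) : (y == 0) = !(y != 0) := by
  simp [bne]

theorem pvStart_cond_congr (pred : List Int) (n i : Int) (hb : 1 ≤ i ∧ i < n) :
    (PySem.List.pyGetD pred i 0 != 0 && (i == 1 || PySem.List.pyGetD pred (i - 1) 0 == 0))
      = (pvK pred n i && !pvK pred n (i - 1)) := by
  rw [← pvKey_eq_pvK pred n i hb]
  by_cases h1 : i = 1
  · subst h1
    rw [pvK_out_eq_false pred n ((1:Int) - 1) (by omega)]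
    simp
  · rw [← pvKey_eq_pvK pred n (i - 1) (by omega),
        show (i == (1:Int)) = false from by simp [h1]]
    rw [pvBeq_zero_eq_not_bne]
    simp

theorem pvEnd_cond_congr (pred : List Int) (n i : Int) (hb : 1 ≤ i ∧ i < n) :
    (PySem.List.pyGetD pred i 0 != 0 && (i == n - 1 || PySem.List.pyGetD pred (i + 1) 0 == 0))
      = (pvK pred n i && !pvK pred n (i + 1)) := by
  rw [← pvKey_eq_pvK pred n i hb]
  by_cases h1 : i = n - 1
  · rw [pvK_out_eq_false pred n (i + 1) (by omega),
        show (i == n - 1) = true from by simp [h1]]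
    simp
  · rw [← pvKey_eq_pvK pred n (i + 1) (by omega),
        show (i == n - 1) = false from by simp [h1]]
    rw [pvBeq_zero_eq_not_bne]
    simp

-- ===== VERDICT (by name: the statement is the Claim_ definition above) =====
theorem get_span_tokens_from_paragraph_spec : Claim_equal_get_span_tokens_from_paragraph := by
  intro pred toks _
  show _ = _
  unfold get_span_tokens_from_paragraph get_span_tokens_from_paragraph_alt
  dsimp only
  set n : Int := min ((toks.length : Int) + 1) (pred.length : Int) with hn
  have hrange : PySem.List.pyRange 1 n 1 = pvConsec 1 (n - 1).toNat :=
    pvRange_eq_consec _ 1 n rfl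
  have hmem : ∀ i ∈ pvConsec 1 (n - 1).toNat, 1 ≤ i ∧ i < n := fun i hi => by
    rw [pvMem_consec] at hi; omega
  have hA := (foldA_spec (fun i => PySem.List.pyGetD pred i 0)
      (fun i => PySem.List.pyGetD toks (i - 1) "") (PySem.List.pyRange 1 n 1)).1 []
  rw [hA, hrange, List.nil_append]
  rw [pvSpans_congr (fun i => PySem.List.pyGetD pred i 0 != 0) (pvK pred n) _ _
      (fun i hi => pvKey_eq_pvK pred n i (hmem i hi))]
  rw [List.filter_congr (fun i hi => pvStart_cond_congr pred n i (hmem i hi)),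
      List.filter_congr (fun i hi => pvEnd_cond_congr pred n i (hmem i hi))]
  refine (pvRuns (pvK pred n) (fun i => PySem.List.pyGetD toks (i - 1) "")
      (fun s e => PySem.Str.join " " (PySem.List.slice toks (some (s - 1)) (some e))) 1 (max n 1)
      ?_ (n - 1).toNat 1 ?_ ?_ (by omega) (by omega)).symm
  · intro s r hs hb
    show PySem.Str.join " " (PySem.List.slice toks (some (s - 1)) (some (s + (r : Int)))) =
      PySem.Str.join " " ((pvConsec s (r + 1)).map (fun i => PySem.List.pyGetD toks (i - 1) ""))
    rw [pvSlice_eq_map_tok toks r s hs (by omega)]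
  · intro _
    exact pvK_out_eq_false pred n (1 - 1) (by omega)
  · exact pvK_out_eq_false pred n (1 + ((n - 1).toNat : Int)) (by omega)
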